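-- pv_equiv track=rewrite | github.com/icebangbang/infinity | app/main/stock/sub_startegy/feature/box_boundary.py | get_bottom_type
-- ===== SOURCE A (Python) =====
-- def get_bottom_type(arrays) -> list:
--     results = []
--
--     for i, item in enumerate(arrays):
--         if i == 0 or i == len(arrays) - 1:
--             # results.append(dict(i=i, v=item))
--             results.append(item)
--             continue
--         target = item
--         pre = arrays[i - 1]
--         next = arrays[i + 1]
--
--         if target < pre and target < next:
--             # results.append(dict(i=i, v=item))
--             results.append(item)
--
--     return results
-- ===== SOURCE B (Python) =====
-- def get_bottom_type(arrays) -> list: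
--     if len(arrays) <= 1:
--         return list(arrays)
--     # stage 1: signs of successive differences (the discrete derivative)
--     signs = [(y > x) - (y < x) for x, y in zip(arrays, arrays[1:])]
--     # stage 2: an interior value is a strict local minimum exactly where the
--     # derivative changes from negative to positive
--     mins = [v for v, s1, s2 in zip(arrays[1:], signs, signs[1:]) if s1 < 0 and s2 > 0]
--     return [arrays[0]] + mins + [arrays[-1]]
-- ===== Notes on version B (the rewrite author's own statement) =====
-- stated objective: alternative
-- what changed: Instead of A's index-guarded loop comparing each element with its neighbours, B first builds the sign list of successive differences (a discrete derivative) and then reads local minima off as negative-to-positive sign changes, assembling endpoints separately.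
import Mathlib
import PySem

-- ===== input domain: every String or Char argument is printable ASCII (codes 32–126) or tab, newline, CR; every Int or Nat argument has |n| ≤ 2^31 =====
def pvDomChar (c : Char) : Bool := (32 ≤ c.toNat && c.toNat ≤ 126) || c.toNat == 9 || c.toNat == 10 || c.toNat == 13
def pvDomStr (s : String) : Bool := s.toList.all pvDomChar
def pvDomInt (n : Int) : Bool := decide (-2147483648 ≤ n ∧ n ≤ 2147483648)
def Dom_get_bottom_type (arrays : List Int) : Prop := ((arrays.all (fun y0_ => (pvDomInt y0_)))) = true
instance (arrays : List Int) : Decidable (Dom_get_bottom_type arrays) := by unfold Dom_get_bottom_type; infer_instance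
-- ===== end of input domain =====

-- B replaces A's neighbour-comparing loop by a difference-sign (discrete
-- derivative) scan: local minima are negative-to-positive sign changes
-- (alternative decomposition; same O(n) cost).

-- ===== PORT A =====
-- arrays[i-1] / arrays[i+1] are only evaluated for 1 ≤ i ≤ len-2, always in
-- range, so pyGetD with a dummy default is exact (Python never raises here).
def get_bottom_type (arrays : List Int) : List Int :=
  (PySem.List.enumerate arrays 0).foldl
    (fun results e =>
      if e.1 = 0 ∨ e.1 = (arrays.length : Int) - 1 then results ++ [e.2]
      else
        let pre := PySem.List.pyGetD arrays (e.1 - 1) 0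
        let next := PySem.List.pyGetD arrays (e.1 + 1) 0
        if e.2 < pre ∧ e.2 < next then results ++ [e.2] else results)
    []

-- ===== PORT B =====
-- (y > x) - (y < x) with Python bools as 0/1; zip as nested List.zip; the
-- filtered comprehensions as map/filterMap; arrays[0] / arrays[-1] in range.
def get_bottom_type_alt (arrays : List Int) : List Int :=
  if arrays.length ≤ 1 then arrays
  else
    let signs :=
      (arrays.zip (PySem.List.slice arrays (some 1) none)).map
        (fun p => (if p.2 > p.1 then (1 : Int) else 0) - (if p.2 < p.1 then 1 else 0))
    let mins :=
      (((PySem.List.slice arrays (some 1) none).zip signs).zip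
          (PySem.List.slice signs (some 1) none)).filterMap
        (fun t => if t.1.2 < 0 ∧ t.2 > 0 then some t.1.1 else none)
    [PySem.List.pyGetD arrays 0 0] ++ mins ++ [PySem.List.pyGetD arrays (-1) 0]

-- ===== PRECONDITION & SPEC =====
def Spec_get_bottom_type (arrays : List Int) (out : List Int) : Prop := out = get_bottom_type_alt arrays
instance (arrays : List Int) (out : List Int) : Decidable (Spec_get_bottom_type arrays out) := by unfold Spec_get_bottom_type; infer_instance

-- ===== CLAIM (what is proved, stated in full; the proofs are below) =====
def Claim_equal_get_bottom_type : Prop := ∀ (arrays : List Int), Dom_get_bottom_type arrays → Spec_get_bottom_type arrays (get_bottom_type arrays)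

-- ===== LEMMAS AND PROOFS =====

-- the interior local-minima selection, as a structural recursion on triples
def goInner : Int → Int → List Int → List Int
  | _, _, [] => []
  | p, x, c :: t => (if x < p ∧ x < c then [x] else []) ++ goInner x c t

-- B's sign function
def sgnP (p : Int × Int) : Int :=
  (if p.2 > p.1 then (1 : Int) else 0) - (if p.2 < p.1 then 1 else 0)

-- A's loop body, as a per-element list (for the flatMap form of the fold)
def stepA (orig : List Int) (e : Int × Int) : List Int :=
  if e.1 = 0 ∨ e.1 = (orig.length : Int) - 1 then [e.2]
  else if e.2 < PySem.List.pyGetD orig (e.1 - 1) 0 ∧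
          e.2 < PySem.List.pyGetD orig (e.1 + 1) 0 then [e.2] else []

lemma foldA_eq_flatMap (orig : List Int) (l : List (Int × Int)) (acc : List Int) :
    l.foldl
      (fun results e =>
        if e.1 = 0 ∨ e.1 = (orig.length : Int) - 1 then results ++ [e.2]
        else
          let pre := PySem.List.pyGetD orig (e.1 - 1) 0
          let next := PySem.List.pyGetD orig (e.1 + 1) 0
          if e.2 < pre ∧ e.2 < next then results ++ [e.2] else results) acc
      = acc ++ l.flatMap (stepA orig) := by
  induction l generalizing acc with
  | nil => simp
  | cons e l ih =>
    simp only [List.foldl_cons, List.flatMap_cons, stepA]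
    split_ifs <;> simp [ih]

lemma sgn_neg (p x : Int) : (sgnP (p, x) < 0) = (x < p) := by
  simp only [sgnP]; split_ifs <;> simp <;> omega

lemma sgn_pos (x c : Int) : (sgnP (x, c) > 0) = (x < c) := by
  simp only [sgnP]; split_ifs <;> simp <;> omega

-- B's sign-change scan equals the direct triple selection
lemma filterMap_sign_win : ∀ (t : List Int) (p x : Int),
    (((x :: t).zip (sgnP (p, x) :: ((x :: t).zip t).map sgnP)).zip
        (((x :: t).zip t).map sgnP)).filterMap
        (fun e => if e.1.2 < 0 ∧ e.2 > 0 then some e.1.1 else none)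
      = goInner p x t := by
  intro t
  induction t with
  | nil => intro p x; simp [goInner]
  | cons c t ih =>
    intro p x
    have ih' := ih x c
    simp only [List.zip_cons_cons, List.map_cons] at ih' ⊢
    simp only [List.filterMap_cons, goInner, ih', sgn_neg, sgn_pos]
    split_ifs <;> simp

lemma coreA (orig : List Int) : ∀ (t : List Int) (i : Nat) (p x : Int),
    orig.drop i = p :: x :: t →
    (PySem.List.enumerate (x :: t) ((i : Int) + 1)).flatMap (stepA orig)
      = goInner p x t ++ [orig.getLastD 0] := by
  intro t
  induction t with
  | nil =>
    intro i p x hdrop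
    have hlen : orig.length = i + 2 := by
      have := congrArg List.length hdrop
      simp [List.length_drop] at this
      omega
    have hx : orig[i + 1]? = some x := by
      have : (orig.drop i)[1]? = orig[i + 1]? := by
        simp [List.getElem?_drop]
      rw [← this, hdrop]; rfl
    have hlast : orig.getLastD 0 = x := by
      have h1 : orig.getLast? = orig[orig.length - 1]? := List.getLast?_eq_getElem?
      have h2 : orig.getLast? = some x := by rw [h1, hlen]; simpa using hx
      simp [List.getLastD_eq_getLast?, h2]
    simp only [PySem.List.enumerate_cons, PySem.List.enumerate_nil,
      List.flatMap_cons, List.flatMap_nil, stepA, hlen, goInner, hlast]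
    have hcond : ((i : Int) + 1 = 0 ∨ (i : Int) + 1 = ((i + 2 : Nat) : Int) - 1) := by
      push_cast; omega
    rw [if_pos hcond]
    simp
  | cons c t ih =>
    intro i p x hdrop
    have hlen : orig.length = i + t.length + 3 := by
      have := congrArg List.length hdrop
      simp [List.length_drop] at this
      omega
    have hp : orig[i]? = some p := by
      have : (orig.drop i)[0]? = orig[i]? := by simp [List.getElem?_drop]
      rw [← this, hdrop]; rfl
    have hc : orig[i + 2]? = some c := by
      have : (orig.drop i)[2]? = orig[i + 2]? := by simp [List.getElem?_drop]
      rw [← this, hdrop]; rfl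
    have hdrop' : orig.drop (i + 1) = x :: c :: t := by
      have : orig.drop (i + 1) = (orig.drop i).drop 1 := by
        rw [List.drop_drop]
      rw [this, hdrop]; rfl
    have hrec := ih (i + 1) x c hdrop'
    rw [PySem.List.enumerate_cons, List.flatMap_cons]
    have hstep : stepA orig ((i : Int) + 1, x) = (if x < p ∧ x < c then [x] else []) := by
      unfold stepA
      have h0 : ¬((i : Int) + 1 = 0 ∨ (i : Int) + 1 = (orig.length : Int) - 1) := by
        rw [hlen]; push_cast; omega
      rw [if_neg h0]
      have hpre : PySem.List.pyGetD orig ((i : Int) + 1 - 1) 0 = p := by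
        have : (i : Int) + 1 - 1 = (i : Int) := by ring
        rw [this, PySem.List.pyGetD_natCast]
        simp [List.getD, hp]
      have hnext : PySem.List.pyGetD orig ((i : Int) + 1 + 1) 0 = c := by
        have : (i : Int) + 1 + 1 = ((i + 2 : Nat) : Int) := by push_cast; ring
        rw [this, PySem.List.pyGetD_natCast]
        simp [List.getD, hc]
      rw [hpre, hnext]
    have hcast : (i : Int) + 1 + 1 = ((i + 1 : Nat) : Int) + 1 := by push_cast; ring
    rw [hstep, hcast, hrec]
    simp [goInner]

lemma alt_cons_cons (a b : Int) (rest : List Int) :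
    get_bottom_type_alt (a :: b :: rest)
      = a :: (goInner a b rest ++ [(a :: b :: rest).getLastD 0]) := by
  unfold get_bottom_type_alt
  rw [if_neg (by simp)]
  have h1 : PySem.List.slice (a :: b :: rest) (some 1) none = b :: rest := by
    rw [PySem.List.slice_from _ (by norm_num)]; rfl
  have hm1 : PySem.List.pyGetD (a :: b :: rest) (-1) 0 = (a :: b :: rest).getLastD 0 := by
    rw [PySem.List.pyGetD_neg_one _ 0 (by simp), List.getLastD_eq_getLast?,
      List.getLast?_eq_some_getLast (by simp)]
    rfl
  simp only [h1, hm1, PySem.List.pyGetD_zero_cons]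
  have hsig : ((a :: b :: rest).zip (b :: rest)).map
      (fun p => (if p.2 > p.1 then (1 : Int) else 0) - (if p.2 < p.1 then 1 else 0))
      = sgnP (a, b) :: ((b :: rest).zip rest).map sgnP := by
    simp [sgnP]
  have hsigtail : PySem.List.slice (sgnP (a, b) :: ((b :: rest).zip rest).map sgnP)
      (some 1) none = ((b :: rest).zip rest).map sgnP := by
    rw [PySem.List.slice_from _ (by norm_num)]; rfl
  simp only [hsig, hsigtail, filterMap_sign_win rest a b]
  simp

-- ===== VERDICT (by name: the statement is the Claim_ definition above) =====
theorem get_bottom_type_spec : Claim_equal_get_bottom_type := by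
  intro arrays _
  unfold Spec_get_bottom_type
  match arrays with
  | [] => rfl
  | [a] =>
    simp [get_bottom_type, get_bottom_type_alt, PySem.List.enumerate_cons,
      PySem.List.enumerate_nil]
  | a :: b :: rest =>
    have hA : get_bottom_type (a :: b :: rest)
        = (PySem.List.enumerate (a :: b :: rest) 0).flatMap (stepA (a :: b :: rest)) := by
      unfold get_bottom_type
      rw [foldA_eq_flatMap]
      simp
    rw [hA, alt_cons_cons]
    rw [PySem.List.enumerate_cons, List.flatMap_cons]
    have hstep0 : stepA (a :: b :: rest) (0, a) = [a] := by
      unfold stepA; simp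
    have hcore := coreA (a :: b :: rest) rest 0 a b (by rfl)
    simp only [Nat.cast_zero] at hcore
    rw [hstep0, hcore]
    simp
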